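-- pv_equiv track=rewrite | github.com/google-code-export/gummworld2 | gamelib/geometry.py | points_to_lines
-- ===== SOURCE A (Python) =====
-- def points_to_lines(points):
--     """Return a list of end point pairs assembled from a "closed" polygon's
--     points.
--     """
--     lines = []
--     ix = [i for i in range(len(points))]
--     ix.append(0)
--     for i in range(0,len(points)):
--         line = points[ix[i]],points[ix[i+1]]
--         lines.append(line)
--     return lines
-- ===== SOURCE B (Python) =====
-- def points_to_lines(points):
--     """Return a list of end point pairs assembled from a "closed" polygon's
--     points.
--     """
--     if not points:
--         return []
--     first = points[0]
--
--     def edges(prev, rest):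
--         if not rest:
--             return [(prev, first)]
--         return [(prev, rest[0])] + edges(rest[0], rest[1:])
--
--     return edges(first, points[1:])
-- ===== Notes on version B (the rewrite author's own statement) =====
-- stated objective: alternative
-- what changed: Replaces A's index table (range list with 0 appended) and counting loop with a structural recursion over the tail that threads the previous vertex and closes the ring with the saved first vertex, using no indices at all.
import Mathlib
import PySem

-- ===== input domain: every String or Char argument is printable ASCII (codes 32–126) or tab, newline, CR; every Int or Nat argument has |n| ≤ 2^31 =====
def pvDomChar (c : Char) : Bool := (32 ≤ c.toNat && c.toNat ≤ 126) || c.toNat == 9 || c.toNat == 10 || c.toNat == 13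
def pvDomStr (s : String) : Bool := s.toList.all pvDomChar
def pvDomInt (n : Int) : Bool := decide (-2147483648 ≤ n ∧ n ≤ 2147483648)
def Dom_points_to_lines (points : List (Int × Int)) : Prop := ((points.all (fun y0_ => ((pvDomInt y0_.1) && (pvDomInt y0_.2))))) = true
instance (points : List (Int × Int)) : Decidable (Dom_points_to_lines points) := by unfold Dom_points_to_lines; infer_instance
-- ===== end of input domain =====

-- B replaces A's index table and counting loop with a structural recursion threading the
-- previous vertex and closing the ring with the first one (alternative decomposition; same O(n) cost).

-- ===== PORT A =====
-- Index lookups use pyGetD with a throwaway default; every index A forms is in range.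
def points_to_lines (points : List (Int × Int)) : List ((Int × Int) × (Int × Int)) :=
  let ix : List Int := (PySem.List.pyRange 0 points.length 1) ++ [0]
  (PySem.List.pyRange 0 points.length 1).foldl
    (fun lines i =>
      lines ++ [(PySem.List.pyGetD points (PySem.List.pyGetD ix i 0) (0, 0),
                 PySem.List.pyGetD points (PySem.List.pyGetD ix (i + 1) 0) (0, 0))])
    []

-- ===== PORT B =====
-- helper 'edges' of Source B: recursion over the remaining points, carrying the previous vertex.
def points_to_lines_edges (first prev : Int × Int) : List (Int × Int) → List ((Int × Int) × (Int × Int))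
  | [] => [(prev, first)]
  | x :: rest => [(prev, x)] ++ points_to_lines_edges first x rest

def points_to_lines_alt (points : List (Int × Int)) : List ((Int × Int) × (Int × Int)) :=
  match points with
  | [] => []
  | first :: rest => points_to_lines_edges first first rest

-- ===== PRECONDITION & SPEC =====
def Spec_points_to_lines (points : List (Int × Int)) (out : List ((Int × Int) × (Int × Int))) : Prop := out = points_to_lines_alt points
instance (points : List (Int × Int)) (out : List ((Int × Int) × (Int × Int))) : Decidable (Spec_points_to_lines points out) := by unfold Spec_points_to_lines; infer_instance

-- ===== CLAIM (what is proved, stated in full; the proofs are below) =====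
def Claim_equal_points_to_lines : Prop := ∀ (points : List (Int × Int)), Dom_points_to_lines points → Spec_points_to_lines points (points_to_lines points)

-- ===== LEMMAS AND PROOFS =====

theorem ix_getD_lt (n k : Nat) (hk : k < n) :
    ((List.range n).map (fun j : Nat => (j : Int)) ++ [(0 : Int)]).getD k 0 = (k : Int) := by
  rw [List.getD_eq_getElem?_getD, List.getElem?_append_left (by simpa using hk)]
  simp [hk]

theorem ix_getD_last (n : Nat) :
    ((List.range n).map (fun j : Nat => (j : Int)) ++ [(0 : Int)]).getD n 0 = 0 := by
  rw [List.getD_eq_getElem?_getD, List.getElem?_append_right (by simp)]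
  simp

theorem points_getD (points : List (Int × Int)) (k : Nat) (hk : k < points.length) :
    PySem.List.pyGetD points (k : Int) (0, 0) = points[k] := by
  rw [PySem.List.pyGetD_natCast, List.getD_eq_getElem?_getD]
  simp [hk]

-- B's recursion produces the zip of the remaining chain with its successor list closed by 'first'.
theorem edges_eq_zip (first prev : Int × Int) (l : List (Int × Int)) :
    points_to_lines_edges first prev l = (prev :: l).zip (l ++ [first]) := by
  induction l generalizing prev with
  | nil => simp [points_to_lines_edges]
  | cons x rest ih => simp [points_to_lines_edges, ih x]

theorem alt_eq_zip (points : List (Int × Int)) :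
    points_to_lines_alt points = points.zip (points.drop 1 ++ points.take 1) := by
  cases points with
  | nil => rfl
  | cons p rest => simp [points_to_lines_alt, edges_eq_zip]

theorem points_to_lines_main (points : List (Int × Int)) :
    points_to_lines points = points_to_lines_alt points := by
  unfold points_to_lines
  rw [alt_eq_zip, PySem.List.foldl_append_singleton_eq_map, PySem.List.pyRange_zero_natCast]
  simp only [List.map_map]
  apply List.ext_getElem
  · simp [List.length_zip]; omega
  · intro k hk hk'
    have hkn : k < points.length := by simpa using hk
    simp only [List.nil_append, List.getElem_map, List.getElem_range, Function.comp_apply,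
      List.getElem_zip, Prod.mk.injEq]
    refine ⟨?_, ?_⟩
    · rw [PySem.List.pyGetD_natCast, ix_getD_lt _ k hkn, points_getD points k hkn]
    · have hc : ((k : Int) + 1) = ((k + 1 : Nat) : Int) := by push_cast; ring
      rw [hc, PySem.List.pyGetD_natCast]
      by_cases h : k + 1 < points.length
      · rw [ix_getD_lt _ (k + 1) h, points_getD points (k + 1) h]
        have h2 : k < (points.drop 1).length := by simp; omega
        rw [List.getElem_append_left h2]
        simp
      · have hke : k + 1 = points.length := by omega
        rw [hke, ix_getD_last, PySem.List.pyGetD_zero, List.getD_eq_getElem?_getD,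
           List.getElem?_eq_getElem (show 0 < points.length by omega)]
        simp only [Option.getD_some]
        have h2 : ¬ k < (points.drop 1).length := by simp; omega
        rw [List.getElem_append_right (by simpa using h2)]
        simp
        congr 1
        omega

-- ===== VERDICT (by name: the statement is the Claim_ definition above) =====
theorem points_to_lines_spec : Claim_equal_points_to_lines := by
  intro points _
  exact points_to_lines_main points
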